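-- pv_equiv track=rewrite | github.com/suhasaggarwal/CodeRepositoryv1 | IndiaTodayRepository/MLsignalsprocessor/DatabaseParser.py | PersonaSegmentDatabaseProcessorWorker
-- ===== SOURCE A (Python) =====
-- def PersonaSegmentDatabaseProcessorWorker(entity):
--     userIdSegmentAffinityMap = {}
--     for z in entity:
--         if z is not None:
--            entityParts = z.split(":")
--            if len(entityParts) > 1:
--               entityParts[1] = entityParts[1].replace("wiki", "").replace("twitter","").replace("conceptnet","")
--               entityParts[2] = entityParts[2]
--               if entityParts[1] not in userIdSegmentAffinityMap:
--                  userIdSegmentAffinityMap[entityParts[1]] = entityParts[2].replace("1000.0","0").replace("0.0","0").replace(".0","").replace("\n", "")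
--               else:
--                  userIdSegmentAffinityMap[entityParts[1]] = userIdSegmentAffinityMap[entityParts[1]] + "," + entityParts[2].replace("1000.0","0").replace("0.0","0").replace(".0","").replace("\n", "")
--
--     return userIdSegmentAffinityMap
-- ===== SOURCE B (Python) =====
-- def PersonaSegmentDatabaseProcessorWorker(entity):
--     # Stage 1: extract the flat stream of (cleaned key, cleaned value) pairs.
--     pairs = []
--     for z in entity:
--         if z is not None:
--             parts = z.split(":")
--             if len(parts) > 2:
--                 key = parts[1].replace("wiki", "").replace("twitter", "").replace("conceptnet", "")
--                 value = parts[2].replace("1000.0", "0").replace("0.0", "0").replace(".0", "").replace("\n", "")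
--                 pairs.append((key, value))
--     # Stage 2: distinct keys in first-occurrence order.
--     keys = []
--     for k, _ in pairs:
--         if k not in keys:
--             keys.append(k)
--     # Stage 3: one output entry per key, joining all its values from the pair stream.
--     return {k: ",".join(v for k2, v in pairs if k2 == k) for k in keys}
-- ===== Notes on version B (the rewrite author's own statement) =====
-- stated objective: alternative
-- what changed: B builds no map incrementally: it extracts a flat list of (key,value) pairs, computes the distinct keys in first-occurrence order, and then constructs each output entry by filtering the pair list per key and joining with ','; A instead threads a dict whose values are growing comma-strings through a single loop.
-- outside the precondition, e.g. on PersonaSegmentDatabaseProcessorWorker(['u1:wikiSports']): A raises IndexError, B returns {}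
-- crash fix: On inputs containing a non-None string with exactly one ':' (two split parts), A raises IndexError on entityParts[2]; B skips that malformed entry and returns the map built from the remaining entries. — e.g. on PersonaSegmentDatabaseProcessorWorker([some "u1:wikiSports"]): A raises IndexError, B returns []
import Mathlib
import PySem

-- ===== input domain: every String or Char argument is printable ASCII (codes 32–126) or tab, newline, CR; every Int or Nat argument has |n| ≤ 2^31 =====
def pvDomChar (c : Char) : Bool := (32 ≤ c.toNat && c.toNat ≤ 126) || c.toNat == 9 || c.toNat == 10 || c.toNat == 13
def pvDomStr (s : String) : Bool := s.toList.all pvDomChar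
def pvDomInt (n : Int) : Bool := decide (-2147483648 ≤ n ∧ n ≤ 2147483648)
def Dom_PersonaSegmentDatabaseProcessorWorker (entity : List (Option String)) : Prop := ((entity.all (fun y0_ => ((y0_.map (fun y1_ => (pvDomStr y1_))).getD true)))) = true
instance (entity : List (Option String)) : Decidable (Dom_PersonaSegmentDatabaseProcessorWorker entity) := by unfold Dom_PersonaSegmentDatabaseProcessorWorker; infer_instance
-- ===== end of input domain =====

-- B builds no map at all: it stages the work as pair extraction, then distinct keys in
-- first-occurrence order, then a per-key filter-and-join over the pair list (objective: alternative).

-- The two replace chains, verbatim from both Pythons (shared text of A and B).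
def pvKeyChain (s : String) : String :=
  PySem.Str.replace (PySem.Str.replace (PySem.Str.replace s "wiki" "") "twitter" "") "conceptnet" ""
def pvValChain (s : String) : String :=
  PySem.Str.replace (PySem.Str.replace (PySem.Str.replace (PySem.Str.replace s "1000.0" "0") "0.0" "0") ".0" "") "\n" ""

-- ===== PORT A =====
def pvStepA (d : PySem.Dict String String) (z : Option String) : PySem.Dict String String :=
  match z with
  | none => d
  | some s =>
    let parts := ((PySem.Str.split? s ":").getD [])
    if parts.length > 1 then
      match PySem.List.pyGet? parts 1, PySem.List.pyGet? parts 2 with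
      | some p1, some p2 =>
        let key := pvKeyChain p1
        if d.contains key = false then
          d.insert key (pvValChain p2)
        else
          d.insert key (d.getD key "" ++ "," ++ pvValChain p2)
      | _, _ => d  -- entityParts[2] out of range: Python A raises IndexError here (excluded by Pre_)
    else d

def PersonaSegmentDatabaseProcessorWorker (entity : List (Option String)) : List (String × String) :=
  (entity.foldl pvStepA PySem.Dict.empty).items

-- ===== PORT B =====
-- Stage 1 of Source B: 'pairs.append((key, value))' for each well-formed entry.
def pvStepPairs (acc : List (String × String)) (z : Option String) : List (String × String) :=
  match z with
  | none => acc
  | some s =>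
    let parts := ((PySem.Str.split? s ":").getD [])
    if parts.length > 2 then
      acc ++ [(pvKeyChain (parts.getD 1 ""), pvValChain (parts.getD 2 ""))]
    else acc

-- Stage 2 of Source B: 'if k not in keys: keys.append(k)'.
def pvStepKeys (ks : List String) (p : String × String) : List String :=
  if ks.contains p.1 then ks else ks ++ [p.1]

def PersonaSegmentDatabaseProcessorWorker_alt (entity : List (Option String)) : List (String × String) :=
  let pairs := entity.foldl pvStepPairs []
  let keys := pairs.foldl pvStepKeys []
  keys.map (fun k => (k, PySem.Str.join "," ((pairs.filter (fun p => p.1 == k)).map Prod.snd)))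

-- ===== PRECONDITION & SPEC =====
-- Pre_ excludes inputs containing a string with exactly one ":" (two split parts): there
-- Python A raises IndexError on entityParts[2].
def Pre_PersonaSegmentDatabaseProcessorWorker (entity : List (Option String)) : Prop :=
  (entity.all (fun z => z.elim true (fun s => ((PySem.Str.split? s ":").getD []).length != 2))) = true
instance (entity : List (Option String)) : Decidable (Pre_PersonaSegmentDatabaseProcessorWorker entity) := by
  unfold Pre_PersonaSegmentDatabaseProcessorWorker; infer_instance
def pvWitness_PersonaSegmentDatabaseProcessorWorker : List (Option String) :=
  [some "u1:wikiSports:1000.0", none, some "u2:wikiSports:7.0", some "nosep"]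

-- On inputs with a non-None entry splitting into exactly two ":"-parts, A raises IndexError;
-- B skips that malformed entry and returns the map built from the well-formed ones.
def Raises_PersonaSegmentDatabaseProcessorWorker (entity : List (Option String)) : Prop :=
  (entity.any (fun z => z.elim false (fun s => ((PySem.Str.split? s ":").getD []).length == 2))) = true
instance (entity : List (Option String)) : Decidable (Raises_PersonaSegmentDatabaseProcessorWorker entity) := by
  unfold Raises_PersonaSegmentDatabaseProcessorWorker; infer_instance
def pvRaiseWitness_PersonaSegmentDatabaseProcessorWorker : List (Option String) :=
  [some "u1:wikiSports"]
def pvRaiseWitnessOut_PersonaSegmentDatabaseProcessorWorker : List (String × String) := []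

def Spec_PersonaSegmentDatabaseProcessorWorker (entity : List (Option String)) (out : List (String × String)) : Prop := out = PersonaSegmentDatabaseProcessorWorker_alt entity
instance (entity : List (Option String)) (out : List (String × String)) : Decidable (Spec_PersonaSegmentDatabaseProcessorWorker entity out) := by unfold Spec_PersonaSegmentDatabaseProcessorWorker; infer_instance

-- ===== CLAIM (what is proved, stated in full; the proofs are below) =====
def Claim_equal_PersonaSegmentDatabaseProcessorWorker : Prop := ∀ (entity : List (Option String)), Dom_PersonaSegmentDatabaseProcessorWorker entity → Pre_PersonaSegmentDatabaseProcessorWorker entity → Spec_PersonaSegmentDatabaseProcessorWorker entity (PersonaSegmentDatabaseProcessorWorker entity)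
def Claim_raises_PersonaSegmentDatabaseProcessorWorker : Prop := (∀ (entity : List (Option String)), Dom_PersonaSegmentDatabaseProcessorWorker entity → Raises_PersonaSegmentDatabaseProcessorWorker entity → ¬ Pre_PersonaSegmentDatabaseProcessorWorker entity) ∧ (Dom_PersonaSegmentDatabaseProcessorWorker (pvRaiseWitness_PersonaSegmentDatabaseProcessorWorker) ∧ Raises_PersonaSegmentDatabaseProcessorWorker (pvRaiseWitness_PersonaSegmentDatabaseProcessorWorker) ∧ PersonaSegmentDatabaseProcessorWorker_alt (pvRaiseWitness_PersonaSegmentDatabaseProcessorWorker) = pvRaiseWitnessOut_PersonaSegmentDatabaseProcessorWorker)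

-- ===== LEMMAS AND PROOFS =====

-- A's loop, re-expressed per extracted pair (proof-side only).
def pvStepP (d : PySem.Dict String String) (p : String × String) : PySem.Dict String String :=
  if d.contains p.1 = false then d.insert p.1 p.2
  else d.insert p.1 (d.getD p.1 "" ++ "," ++ p.2)

-- the per-key output entry built from a pair list
def pvEntry (ps : List (String × String)) (k : String) : String × String :=
  (k, PySem.Str.join "," ((ps.filter (fun p => p.1 == k)).map Prod.snd))

theorem pv_inter_append (sep : List Char) (l : List (List Char)) (x : List Char) (h : l ≠ []) :
    List.intercalate sep (l ++ [x]) = List.intercalate sep l ++ sep ++ x := by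
  induction l with
  | nil => simp at h
  | cons a t ih =>
    cases t with
    | nil => simp [List.intercalate, List.intersperse]
    | cons b u =>
      have := ih (by simp)
      simp only [List.cons_append, List.intercalate, List.intersperse] at *
      simp [this]

theorem pv_join_singleton (v : String) : PySem.Str.join "," [v] = v := by
  simp [PySem.Str.join]

theorem pv_join_append (vs : List String) (v : String) (h : vs ≠ []) :
    PySem.Str.join "," (vs ++ [v]) = PySem.Str.join "," vs ++ "," ++ v := by
  simp only [PySem.Str.join, PySem.Chars.join, List.map_append, List.map_cons, List.map_nil]
  rw [pv_inter_append _ _ _ (by simpa using h)]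
  rw [String.ofList_append, String.ofList_append]
  simp [String.ofList_toList]

-- stage-1 accumulator shape
theorem pv_pairs_acc (l : List (Option String)) (acc : List (String × String)) :
    l.foldl pvStepPairs acc = acc ++ l.foldl pvStepPairs [] := by
  induction l generalizing acc with
  | nil => simp
  | cons z t ih =>
    simp only [List.foldl_cons]
    rw [ih, ih (pvStepPairs [] z)]
    cases z with
    | none => simp [pvStepPairs]
    | some s =>
      simp only [pvStepPairs]
      split <;> simp

-- stage-2 membership
theorem pv_keys_mem (ps : List (String × String)) (ks : List String) (k : String) :
    k ∈ ps.foldl pvStepKeys ks ↔ k ∈ ks ∨ k ∈ ps.map Prod.fst := by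
  induction ps generalizing ks with
  | nil => simp
  | cons p t ih =>
    simp only [List.foldl_cons, pvStepKeys]
    by_cases h : ks.contains p.1
    · rw [if_pos h, ih]
      have : p.1 ∈ ks := by simpa using h
      simp only [List.map_cons, List.mem_cons]
      constructor
      · tauto
      · rintro (hk | hk | hk)
        · exact Or.inl hk
        · exact Or.inl (hk ▸ this)
        · exact Or.inr hk
    · rw [if_neg h, ih]
      simp only [List.mem_append, List.map_cons, List.mem_cons]
      tauto

theorem pv_keys_nodup (ps : List (String × String)) (ks : List String) (h : ks.Nodup) :
    (ps.foldl pvStepKeys ks).Nodup := by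
  induction ps generalizing ks with
  | nil => exact h
  | cons p t ih =>
    simp only [List.foldl_cons, pvStepKeys]
    by_cases hc : ks.contains p.1
    · rw [if_pos hc]; exact ih ks h
    · rw [if_neg hc]
      refine ih _ ?_
      rw [List.nodup_append]
      refine ⟨h, List.nodup_singleton _, ?_⟩
      intro a ha b hb
      simp only [List.mem_singleton] at hb
      subst hb
      exact fun heq => (by simpa using hc : p.1 ∉ ks) (heq ▸ ha)

-- LEMMA 1: under Pre_, A's loop over the input equals the pair-wise loop over stage 1's pairs.
theorem pv_fold_eq (l : List (Option String))
    (hpre : ∀ s : String, some s ∈ l → (((PySem.Str.split? s ":").getD [])).length ≠ 2)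
    (d : PySem.Dict String String) :
    l.foldl pvStepA d = (l.foldl pvStepPairs []).foldl pvStepP d := by
  induction l generalizing d with
  | nil => simp
  | cons z t ih =>
    have hpret : ∀ s : String, some s ∈ t → (((PySem.Str.split? s ":").getD [])).length ≠ 2 :=
      fun s hs => hpre s (List.mem_cons_of_mem _ hs)
    simp only [List.foldl_cons]
    rw [pv_pairs_acc t (pvStepPairs [] z)]
    cases z with
    | none => simpa [pvStepPairs, pvStepA] using ih hpret d
    | some s =>
      set parts := ((PySem.Str.split? s ":").getD []) with hparts
      by_cases hlen : parts.length > 2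
      · have h1 : (1 : Nat) < parts.length := by omega
        have h2 : (2 : Nat) < parts.length := by omega
        have hg1 : PySem.List.pyGet? parts ((1 : Nat) : Int) = some parts[1] := by
          rw [PySem.List.pyGet?_natCast]; exact List.getElem?_eq_getElem h1
        have hg2 : PySem.List.pyGet? parts ((2 : Nat) : Int) = some parts[2] := by
          rw [PySem.List.pyGet?_natCast]; exact List.getElem?_eq_getElem h2
        have hd1 : parts.getD 1 "" = parts[1] := List.getD_eq_getElem _ _ h1
        have hd2 : parts.getD 2 "" = parts[2] := List.getD_eq_getElem _ _ h2
        simp only [pvStepA, pvStepPairs, ← hparts, if_pos hlen, if_pos (by omega : parts.length > 1)]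
        rw [show ((1 : Int)) = ((1 : Nat) : Int) by norm_num,
            show ((2 : Int)) = ((2 : Nat) : Int) by norm_num, hg1, hg2, hd1, hd2]
        simp only [List.nil_append, List.singleton_append, List.foldl_cons]
        rw [ih hpret]
        congr 1
      · have hne2 : parts.length ≠ 2 := hpre s List.mem_cons_self
        have hle : ¬ parts.length > 1 := by omega
        simp only [pvStepA, pvStepPairs, ← hparts, if_neg hlen, if_neg hle]
        simpa using ih hpret d

-- LEMMA 2 (main invariant, reverse induction on the pair list): the dict A builds, viewed as
-- an item list, is exactly B's stages 2+3 applied to the pair list.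
theorem pv_dict_items (ps : List (String × String)) :
    (ps.foldl pvStepP PySem.Dict.empty).items
      = (ps.foldl pvStepKeys []).map (pvEntry ps) := by
  induction ps using List.reverseRecOn with
  | nil => simp [PySem.Dict.empty]
  | append_singleton ps p ih =>
    obtain ⟨k, v⟩ := p
    set D := ps.foldl pvStepP PySem.Dict.empty with hD
    set K := ps.foldl pvStepKeys [] with hK
    have hkeysD : D.keys = K := by
      simp only [PySem.Dict.keys, ih, List.map_map]
      have hcomp : ((fun x : String × String => x.1) ∘ pvEntry ps) = id := rfl
      rw [hcomp, List.map_id]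
    have hndK : K.Nodup := pv_keys_nodup ps [] List.nodup_nil
    have hndD : D.keys.Nodup := by rw [hkeysD]; exact hndK
    have hcont : D.contains k = decide (k ∈ K) := by
      rw [PySem.Dict.contains_eq_decide_mem_keys, hkeysD]
    have hKmem : ∀ k', k' ∈ K ↔ k' ∈ ps.map Prod.fst := by
      intro k'; rw [hK, pv_keys_mem]; simp
    have hfilter_ne : ∀ k', k' ≠ k →
        (ps ++ [(k, v)]).filter (fun p => p.1 == k') = ps.filter (fun p => p.1 == k') := by
      intro k' hne
      rw [List.filter_append]
      have hb : (k == k') = false := beq_eq_false_iff_ne.mpr (Ne.symm hne)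
      simp [List.filter, hb]
    have hstepK : (ps ++ [(k, v)]).foldl pvStepKeys [] =
        if k ∈ K then K else K ++ [k] := by
      rw [List.foldl_append]
      simp only [List.foldl_cons, List.foldl_nil, pvStepKeys, ← hK]
      by_cases h : k ∈ K
      · simp [h]
      · simp [h]
    rw [List.foldl_append]
    simp only [List.foldl_cons, List.foldl_nil, ← hD]
    by_cases hk : k ∈ K
    · -- existing key: A overwrites in place, B's key list is unchanged
      have hvs_ne : ps.filter (fun p => p.1 == k) ≠ [] := by
        have : k ∈ ps.map Prod.fst := (hKmem k).mp hk
        obtain ⟨p, hp, hpk⟩ := List.mem_map.mp this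
        intro hnil
        have hpf : p ∈ ps.filter (fun p => p.1 == k) := by
          rw [List.mem_filter]; exact ⟨hp, by simp [hpk]⟩
        simp [hnil] at hpf
      have hmemD : pvEntry ps k ∈ D.items := by rw [ih]; exact List.mem_map_of_mem hk
      have hgD : D.getD k "" = (pvEntry ps k).2 :=
        PySem.Dict.getD_of_mem_items D hmemD hndD ""
      simp only [pvStepP, hcont, decide_eq_false_iff_not, hk, not_true_eq_false]
      rw [if_neg (by simp [hk])]
      rw [PySem.Dict.items_insert_of_contains D _ (by rw [hcont]; simpa using hk)]
      rw [hstepK, if_pos hk, ih, List.map_map]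
      apply List.map_congr_left
      intro k' hk'
      by_cases hke : k' = k
      · subst hke
        simp only [Function.comp, pvEntry, beq_self_eq_true, if_pos]
        rw [hgD]
        simp only [pvEntry, List.filter_append, List.map_append]
        rw [List.filter_cons_of_pos (by simp), List.filter_nil]
        simp only [List.map_cons, List.map_nil]
        rw [pv_join_append _ v (by simpa using hvs_ne)]
      · simp only [Function.comp, pvEntry]
        rw [hfilter_ne k' hke]
        simp [hke]
    · -- new key: A appends the item, B appends the key
      simp only [pvStepP, hcont, hk, decide_false]
      rw [if_pos trivial]
      rw [PySem.Dict.items_insert_of_not_contains D _ (by rw [hcont]; simpa using hk)]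
      rw [hstepK, if_neg hk, List.map_append, ih]
      congr 1
      · apply List.map_congr_left
        intro k' hk'
        have hke : k' ≠ k := fun h => hk (h ▸ hk')
        simp only [pvEntry]
        rw [hfilter_ne k' hke]
      · have hempty : ps.filter (fun p => p.1 == k) = [] := by
          rw [List.filter_eq_nil_iff]
          intro p hp hpk
          exact hk ((hKmem k).mpr (List.mem_map.mpr ⟨p, hp, by simpa using hpk⟩))
        simp only [List.map_cons, List.map_nil, pvEntry, List.filter_append, hempty]
        rw [List.filter_cons_of_pos (by simp), List.filter_nil]
        simp [pv_join_singleton]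

-- ===== VERDICT (by name: the statement is the Claim_ definition above) =====
theorem PersonaSegmentDatabaseProcessorWorker_spec : Claim_equal_PersonaSegmentDatabaseProcessorWorker := by
  intro entity _ hpre
  unfold Spec_PersonaSegmentDatabaseProcessorWorker PersonaSegmentDatabaseProcessorWorker
    PersonaSegmentDatabaseProcessorWorker_alt
  rw [pv_fold_eq entity ?_ PySem.Dict.empty]
  · exact pv_dict_items _
  · intro s hs
    unfold Pre_PersonaSegmentDatabaseProcessorWorker at hpre
    rw [List.all_eq_true] at hpre
    simpa using hpre _ hs

@[simp] theorem PersonaSegmentDatabaseProcessorWorker_raises : Claim_raises_PersonaSegmentDatabaseProcessorWorker := by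
  unfold Claim_raises_PersonaSegmentDatabaseProcessorWorker
  constructor
  · intro entity _ hr hpre
    unfold Raises_PersonaSegmentDatabaseProcessorWorker at hr
    unfold Pre_PersonaSegmentDatabaseProcessorWorker at hpre
    rw [List.any_eq_true] at hr
    rw [List.all_eq_true] at hpre
    obtain ⟨z, hz, hzt⟩ := hr
    have := hpre z hz
    cases z with
    | none => simp at hzt
    | some s => simp at hzt this; omega
  · exact ⟨by decide, by decide, by decide⟩
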